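-- pv_equiv track=rewrite | github.com/vpatel2018/PersonalProjects | LearningCurveForecasting/learning_curve_models.py | remove_noise
-- ===== SOURCE A (Python) =====
-- def data_is_noise(pairs, index, sign):
--
--     if(sign == 'ahead'):
--
--         numPtsBelow = 0
--         numPtsAboveSame = 0
--
--         for x in range(index + 1, len(pairs)):
--             if(pairs[x][1] < pairs[index][1]):
--                numPtsBelow += 1
--             else:
--                numPtsAboveSame += 1
--             #
--         #
--
--         return numPtsBelow > numPtsAboveSame
--
--     elif(sign == 'behind'):
--
--         numPtsAbove = 0
--         numPtsBelowSame = 0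
--
--         for x in range(0, index):
--             if(pairs[x][1] > pairs[index][1]):
--                numPtsAbove += 1
--             else:
--                numPtsBelowSame += 1
--             #
--         #
--
--         return numPtsAbove > numPtsBelowSame
--
--     #
--
--     return None
--
-- def remove_noise(xVals, yVals):
--
--     pairs = [[xVals[x], yVals[x]] for x in range(0, len(xVals))]
--     lastIndex = len(pairs) - 1
--     newXVals = []
--     newYVals = []
--
--     for p in range(0, lastIndex):
--         isNoisy = data_is_noise(pairs, p, 'ahead')
--         if(isNoisy == False):
--            newXVals.append(pairs[p][0])
--            newYVals.append(pairs[p][1])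
--         #
--     #
--
--     newXVals.append(pairs[lastIndex][0])
--     newYVals.append(pairs[lastIndex][1])
--
--     if(len(newXVals) == 1 and len(newYVals) == 1):
--        return [newXVals, newYVals]
--     #
--
--     pairs = [[newXVals[x], newYVals[x]] for x in range(0, len(newXVals))]
--     lastIndex = len(pairs) - 1
--     brandNewXs = []
--     brandNewYs = []
--
--     for p in range(1, lastIndex + 1):
--         isNoisy = data_is_noise(pairs, p, 'behind')
--         if(isNoisy == False):
--            brandNewXs.append(pairs[p][0])
--            brandNewYs.append(pairs[p][1])
--         #
--     #
--
--     brandNewXs.append(pairs[0][0])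
--     brandNewYs.append(pairs[0][1])
--
--     return [brandNewXs, brandNewYs]
-- ===== SOURCE B (Python) =====
-- # Same result as the original, but each pass keeps a sorted list of the y-values
-- # already scanned and finds each count by binary search instead of re-scanning
-- # the whole prefix/suffix for every point.
--
-- def _bisect_left(a, v):
--     lo, hi = 0, len(a)
--     while lo < hi:
--         mid = (lo + hi) // 2
--         if a[mid] < v:
--             lo = mid + 1
--         else:
--             hi = mid
--     return lo
--
-- def _bisect_right(a, v):
--     lo, hi = 0, len(a)
--     while lo < hi:
--         mid = (lo + hi) // 2
--         if a[mid] <= v: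
--             lo = mid + 1
--         else:
--             hi = mid
--     return lo
--
-- def _insort(a, v):
--     pos = _bisect_left(a, v)
--     a[pos:pos] = [v]
--
-- def remove_noise(xVals, yVals):
--     pts = list(zip(xVals, yVals))
--     # pass 1, right to left: keep a point iff at most half of the later y's lie below it
--     kept = []
--     seen = []
--     for x, y in reversed(pts):
--         if 2 * _bisect_left(seen, y) <= len(seen):
--             kept.append((x, y))
--         _insort(seen, y)
--     kept.reverse()
--     if len(kept) == 1:
--         return [[kept[0][0]], [kept[0][1]]]
--     # pass 2, left to right: keep a point (other than the first) iff at most half of the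
--     # earlier kept y's lie above it; the first kept point goes last, as in the original
--     newXs, newYs = [], []
--     seen = []
--     i = 0
--     for x, y in kept:
--         if i > 0 and 2 * (len(seen) - _bisect_right(seen, y)) <= len(seen):
--             newXs.append(x)
--             newYs.append(y)
--         _insort(seen, y)
--         i += 1
--     newXs.append(kept[0][0])
--     newYs.append(kept[0][1])
--     return [newXs, newYs]
-- ===== Notes on version B (the rewrite author's own statement) =====
-- stated objective: faster
-- what changed: Each pass keeps one sorted list of the y-values already scanned and obtains each point's below/above count by binary search in that list, instead of re-scanning the whole suffix/prefix for every point as A does.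
import Mathlib
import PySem

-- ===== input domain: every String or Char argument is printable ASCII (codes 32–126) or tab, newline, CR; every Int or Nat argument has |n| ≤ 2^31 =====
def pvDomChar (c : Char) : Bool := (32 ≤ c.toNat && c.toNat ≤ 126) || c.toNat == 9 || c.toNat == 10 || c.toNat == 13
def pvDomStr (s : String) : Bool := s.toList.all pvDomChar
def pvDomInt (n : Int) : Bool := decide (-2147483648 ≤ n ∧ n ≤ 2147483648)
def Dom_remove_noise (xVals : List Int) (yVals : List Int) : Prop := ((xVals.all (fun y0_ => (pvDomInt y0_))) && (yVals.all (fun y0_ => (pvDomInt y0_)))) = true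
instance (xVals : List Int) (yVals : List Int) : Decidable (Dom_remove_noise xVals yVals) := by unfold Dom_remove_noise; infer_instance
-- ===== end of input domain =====

-- B replaces A's per-point rescans with one sorted list of already-seen y-values per
-- pass, found by binary search; measured much faster at the large sizes.

-- ===== PORT A =====
def data_is_noise (pairs : List (List Int)) (index : Int) (sign : String) : Option Bool :=
  if sign == "ahead" then
    let st := (PySem.List.pyRange (index + 1) (PySem.List.len pairs)).foldl
      (fun (st : Int × Int) x =>
        if PySem.List.pyGetD (PySem.List.pyGetD pairs x []) 1 0 <
           PySem.List.pyGetD (PySem.List.pyGetD pairs index []) 1 0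
        then (st.1 + 1, st.2) else (st.1, st.2 + 1)) (0, 0)
    some (decide (st.1 > st.2))
  else if sign == "behind" then
    let st := (PySem.List.pyRange 0 index).foldl
      (fun (st : Int × Int) x =>
        if PySem.List.pyGetD (PySem.List.pyGetD pairs x []) 1 0 >
           PySem.List.pyGetD (PySem.List.pyGetD pairs index []) 1 0
        then (st.1 + 1, st.2) else (st.1, st.2 + 1)) (0, 0)
    some (decide (st.1 > st.2))
  else none

def remove_noise (xVals : List Int) (yVals : List Int) : List (List Int) :=
  let pairs := (PySem.List.pyRange 0 (PySem.List.len xVals)).map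
      (fun x => [PySem.List.pyGetD xVals x 0, PySem.List.pyGetD yVals x 0])
  let lastIndex : Int := PySem.List.len pairs - 1
  let st1 := (PySem.List.pyRange 0 lastIndex).foldl
    (fun (st : List Int × List Int) p =>
      if data_is_noise pairs p "ahead" == some false then
        (st.1 ++ [PySem.List.pyGetD (PySem.List.pyGetD pairs p []) 0 0],
         st.2 ++ [PySem.List.pyGetD (PySem.List.pyGetD pairs p []) 1 0])
      else st) ([], [])
  let newXVals := st1.1 ++ [PySem.List.pyGetD (PySem.List.pyGetD pairs lastIndex []) 0 0]
  let newYVals := st1.2 ++ [PySem.List.pyGetD (PySem.List.pyGetD pairs lastIndex []) 1 0]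
  if newXVals.length == 1 && newYVals.length == 1 then [newXVals, newYVals]
  else
    let pairs2 := (PySem.List.pyRange 0 (PySem.List.len newXVals)).map
        (fun x => [PySem.List.pyGetD newXVals x 0, PySem.List.pyGetD newYVals x 0])
    let lastIndex2 : Int := PySem.List.len pairs2 - 1
    let st2 := (PySem.List.pyRange 1 (lastIndex2 + 1)).foldl
      (fun (st : List Int × List Int) p =>
        if data_is_noise pairs2 p "behind" == some false then
          (st.1 ++ [PySem.List.pyGetD (PySem.List.pyGetD pairs2 p []) 0 0],
           st.2 ++ [PySem.List.pyGetD (PySem.List.pyGetD pairs2 p []) 1 0])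
        else st) ([], [])
    [st2.1 ++ [PySem.List.pyGetD (PySem.List.pyGetD pairs2 0 []) 0 0],
     st2.2 ++ [PySem.List.pyGetD (PySem.List.pyGetD pairs2 0 []) 1 0]]

-- ===== PORT B =====
-- _insort: insert y at position _bisect_left(seen, y)
def insortLeft (seen : List Int) (y : Int) : List Int :=
  let pos := PySem.List.bisectLeft seen y
  seen.take pos ++ y :: seen.drop pos

def remove_noise_alt (xVals : List Int) (yVals : List Int) : List (List Int) :=
  let pts := xVals.zip yVals
  -- pass 1, right to left over pts, state = (kept-so-far reversed, sorted seen)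
  let st1 := pts.reverse.foldl
    (fun (st : List (Int × Int) × List Int) xy =>
      ((if 2 * PySem.List.bisectLeft st.2 xy.2 ≤ st.2.length then st.1 ++ [xy] else st.1),
       insortLeft st.2 xy.2)) ([], [])
  let kept := st1.1.reverse
  if kept.length == 1 then
    [[(PySem.List.pyGetD kept 0 (0, 0)).1], [(PySem.List.pyGetD kept 0 (0, 0)).2]]
  else
    -- pass 2, left to right over kept, state = (newXs, newYs, sorted seen); i is the index
    let st2 := (PySem.List.enumerate kept).foldl
      (fun (st : List Int × List Int × List Int) ixy =>
        if 0 < ixy.1 ∧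
           2 * (st.2.2.length - PySem.List.bisectRight st.2.2 ixy.2.2) ≤ st.2.2.length then
          (st.1 ++ [ixy.2.1], st.2.1 ++ [ixy.2.2], insortLeft st.2.2 ixy.2.2)
        else (st.1, st.2.1, insortLeft st.2.2 ixy.2.2)) ([], [], [])
    [st2.1 ++ [(PySem.List.pyGetD kept 0 (0, 0)).1],
     st2.2.1 ++ [(PySem.List.pyGetD kept 0 (0, 0)).2]]

-- ===== PRECONDITION & SPEC =====
-- Pre_ excludes exactly the inputs on which A raises IndexError: an empty xVals
-- (pairs[-1] on the empty list) and yVals shorter than xVals (yVals[x] out of range).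
def Pre_remove_noise (xVals : List Int) (yVals : List Int) : Prop :=
  xVals ≠ [] ∧ xVals.length ≤ yVals.length
instance (xVals : List Int) (yVals : List Int) : Decidable (Pre_remove_noise xVals yVals) := by unfold Pre_remove_noise; infer_instance
def pvWitness_remove_noise : List Int × List Int := ([1, 2, 3], [5, 4, 6])

def Spec_remove_noise (xVals : List Int) (yVals : List Int) (out : List (List Int)) : Prop := out = remove_noise_alt xVals yVals
instance (xVals : List Int) (yVals : List Int) (out : List (List Int)) : Decidable (Spec_remove_noise xVals yVals out) := by unfold Spec_remove_noise; infer_instance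

-- ===== CLAIM (what is proved, stated in full; the proofs are below) =====
def Claim_equal_remove_noise : Prop := ∀ (xVals : List Int) (yVals : List Int), Dom_remove_noise xVals yVals → Pre_remove_noise xVals yVals → Spec_remove_noise xVals yVals (remove_noise xVals yVals)
-- ===== LEMMAS AND PROOFS =====

-- pair → two-element list, as A's comprehensions build them
def p2l (q : Int × Int) : List Int := [q.1, q.2]

-- pass-1 specification: a point is kept iff at most half of the y-values after it
-- (plus the ambient context ctx) lie strictly below it
def keepCtx (ctx : List Int) : List (Int × Int) → List (Int × Int)
  | [] => []
  | q :: rest =>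
    (if 2 * ((rest.map Prod.snd ++ ctx).countP (fun v => decide (v < q.2))) ≤
        (rest.map Prod.snd ++ ctx).length then [q] else []) ++ keepCtx ctx rest

-- pass-2 specification: a non-first point is kept iff at most half of the y-values
-- before it (accumulated in ctx) lie strictly above it
def keepBehind : List Int → List (Int × Int) → List (Int × Int)
  | _, [] => []
  | ctx, q :: rest =>
    (if 0 < ctx.length ∧ 2 * (ctx.countP (fun v => decide (q.2 < v))) ≤ ctx.length
     then [q] else []) ++ keepBehind (ctx ++ [q.2]) rest

-- the common intermediate form both ports are reduced to
def midSpec (pts : List (Int × Int)) : List (List Int) :=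
  match keepCtx [] pts with
  | [] => []
  | q0 :: rest =>
    if (q0 :: rest : List (Int × Int)).length = 1 then [[q0.1], [q0.2]]
    else [(keepBehind [q0.2] rest).map Prod.fst ++ [q0.1],
          (keepBehind [q0.2] rest).map Prod.snd ++ [q0.2]]

theorem bisectLeft_eq_countP (xs : List Int) (y : Int) (h : List.Pairwise (· ≤ ·) xs) :
    PySem.List.bisectLeft xs y = xs.countP (fun v => decide (v < y)) := by
  obtain ⟨hle, hlt, hge⟩ := PySem.List.bisectLeft_spec xs y h
  set k := PySem.List.bisectLeft xs y with hk
  conv_rhs => rw [← List.take_append_drop k xs]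
  rw [List.countP_append]
  have h1 : (xs.take k).countP (fun v => decide (v < y)) = (xs.take k).length := by
    rw [List.countP_eq_length]
    intro a ha
    rw [List.mem_take_iff_getElem] at ha
    obtain ⟨j, hj, rfl⟩ := ha
    simpa using hlt j (by omega) (by omega)
  have h2 : (xs.drop k).countP (fun v => decide (v < y)) = 0 := by
    rw [List.countP_eq_zero]
    intro a ha
    rw [List.mem_drop_iff_getElem] at ha
    obtain ⟨j, hj, rfl⟩ := ha
    simpa using hge (k + j) (by omega) (by omega)
  rw [h1, h2, List.length_take]
  omega

theorem bisectRight_eq_countP (xs : List Int) (y : Int) (h : List.Pairwise (· ≤ ·) xs) :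
    PySem.List.bisectRight xs y = xs.countP (fun v => decide (v ≤ y)) := by
  obtain ⟨hle, hlt, hge⟩ := PySem.List.bisectRight_spec xs y h
  set k := PySem.List.bisectRight xs y with hk
  conv_rhs => rw [← List.take_append_drop k xs]
  rw [List.countP_append]
  have h1 : (xs.take k).countP (fun v => decide (v ≤ y)) = (xs.take k).length := by
    rw [List.countP_eq_length]
    intro a ha
    rw [List.mem_take_iff_getElem] at ha
    obtain ⟨j, hj, rfl⟩ := ha
    simpa using hlt j (by omega) (by omega)
  have h2 : (xs.drop k).countP (fun v => decide (v ≤ y)) = 0 := by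
    rw [List.countP_eq_zero]
    intro a ha
    rw [List.mem_drop_iff_getElem] at ha
    obtain ⟨j, hj, rfl⟩ := ha
    simpa using hge (k + j) (by omega) (by omega)
  rw [h1, h2, List.length_take]
  omega

theorem insortLeft_perm (s : List Int) (y : Int) : (insortLeft s y).Perm (y :: s) := by
  unfold insortLeft
  exact List.perm_middle.trans (by rw [List.take_append_drop])

theorem insortLeft_pairwise (s : List Int) (y : Int) (h : List.Pairwise (· ≤ ·) s) :
    List.Pairwise (· ≤ ·) (insortLeft s y) := by
  unfold insortLeft
  obtain ⟨hle, hlt, hge⟩ := PySem.List.bisectLeft_spec s y h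
  set k := PySem.List.bisectLeft s y with hk
  rw [List.pairwise_append]
  refine ⟨h.take, ?_, ?_⟩
  · rw [List.pairwise_cons]
    refine ⟨?_, h.drop⟩
    intro b hb
    rw [List.mem_drop_iff_getElem] at hb
    obtain ⟨j, hj, rfl⟩ := hb
    exact hge (k + j) (by omega) (by omega)
  · intro a ha b hb
    rw [List.mem_take_iff_getElem] at ha
    obtain ⟨i, hi, rfl⟩ := ha
    have hay : s[i] < y := hlt i (by omega) (by omega)
    rcases List.mem_cons.mp hb with rfl | hb
    · exact le_of_lt hay
    · rw [List.mem_drop_iff_getElem] at hb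
      obtain ⟨j, hj, rfl⟩ := hb
      exact le_trans (le_of_lt hay) (hge (k + j) (by omega) (by omega))

-- a loop appending (f p, g p) to two accumulators under a test is two filtered maps
theorem foldl_two_appends {α : Type} (l : List α) (c : α → Bool) (f g : α → Int)
    (a b : List Int) :
    l.foldl (fun (st : List Int × List Int) p =>
      if c p then (st.1 ++ [f p], st.2 ++ [g p]) else st) (a, b)
      = (a ++ (l.filter c).map f, b ++ (l.filter c).map g) := by
  have hfun : (fun (st : List Int × List Int) p =>
      if c p then (st.1 ++ [f p], st.2 ++ [g p]) else st)
      = fun (st : List Int × List Int) p =>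
        ((fun acc x => if c x then acc ++ [f x] else acc) st.1 p,
         (fun acc x => if c x then acc ++ [g x] else acc) st.2 p) := by
    funext st p
    by_cases hc : c p <;> simp [hc]
  rw [hfun, PySem.List.foldl_prod_mk (f := fun acc x => if c x then acc ++ [f x] else acc)
      (g := fun acc x => if c x then acc ++ [g x] else acc),
    PySem.List.foldl_append_if, PySem.List.foldl_append_if]

-- A's two complementary counters, as countP and length
theorem counter_foldl {α : Type} (l : List α) (P : α → Prop) [DecidablePred P] :
    l.foldl (fun (st : Int × Int) x => if P x then (st.1 + 1, st.2) else (st.1, st.2 + 1)) (0, 0)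
      = ((l.countP (fun x => decide (P x)) : Int),
         (l.length : Int) - (l.countP (fun x => decide (P x)) : Int)) := by
  have hfun : (fun (st : Int × Int) x => if P x then (st.1 + 1, st.2) else (st.1, st.2 + 1))
      = fun (st : Int × Int) x =>
        ((fun a x => if P x then a + 1 else a) st.1 x,
         (fun a x => if P x then a else a + 1) st.2 x) := by
    funext st x
    by_cases hc : P x <;> simp [hc]
  have hswap : (fun (a : Int) x => if P x then a else a + 1)
      = fun (a : Int) x => if ¬ P x then a + 1 else a := by
    funext a x
    rw [ite_not]
  rw [hfun, PySem.List.foldl_prod_mk (f := fun a x => if P x then a + 1 else a)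
      (g := fun a x => if P x then a else a + 1),
    PySem.List.foldl_ite_add_one, hswap, PySem.List.foldl_ite_add_one]
  have hcc : l.countP (fun x => decide ¬ P x)
      = l.countP (fun a => decide ¬ ((fun x => decide (P x)) a = true)) := by
    apply List.countP_congr
    intro x _
    simp
  have hlen := List.length_eq_countP_add_countP (fun x => decide (P x)) (l := l)
  rw [Prod.ext_iff]
  constructor
  · simp
  · simp only []
    rw [hcc]
    push_cast
    omega

theorem map_getD_range {α : Type} (xs : List α) (d : α) (n : Nat) (h : n ≤ xs.length) :
    (List.range n).map (fun k => xs.getD k d) = xs.take n := by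
  apply List.ext_getElem
  · simp [h]
  · intro i h1 h2
    simp only [List.getElem_map, List.getElem_range, List.getElem_take]
    rw [List.getD_eq_getElem]

theorem map_pyGetD_pyRange_take {α : Type} (xs : List α) (d : α) (p : Int) (h0 : 0 ≤ p)
    (h1 : p.toNat ≤ xs.length) :
    (PySem.List.pyRange 0 p).map (fun j => PySem.List.pyGetD xs j d) = xs.take p.toNat := by
  rw [PySem.List.pyRange_zero, List.map_map]
  have hco : ((fun j => PySem.List.pyGetD xs j d) ∘ fun (k : Nat) => (k : Int))
      = fun k => xs.getD k d := by
    funext k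
    simp
  rw [hco, map_getD_range xs d _ h1]

theorem dataA_eq (pairs : List (List Int)) (p : Int) (h0 : 0 ≤ p) :
    (data_is_noise pairs p "ahead" == some false)
      = decide (2 * ((pairs.drop (p.toNat + 1)).countP
            (fun l => decide (PySem.List.pyGetD l 1 0 <
              PySem.List.pyGetD (PySem.List.pyGetD pairs p []) 1 0)))
          ≤ (pairs.drop (p.toNat + 1)).length) := by
  simp only [data_is_noise, beq_self_eq_true, if_true]
  rw [counter_foldl]
  have htn : (p + 1).toNat = p.toNat + 1 := by omega
  have hmap := PySem.List.map_pyGetD_pyRange pairs ([] : List Int) (a := p + 1) (by omega)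
  rw [htn] at hmap
  have hcnt : (PySem.List.pyRange (p + 1) (PySem.List.len pairs)).countP
      (fun x => decide (PySem.List.pyGetD (PySem.List.pyGetD pairs x []) 1 0 <
        PySem.List.pyGetD (PySem.List.pyGetD pairs p []) 1 0))
      = (pairs.drop (p.toNat + 1)).countP
        (fun l => decide (PySem.List.pyGetD l 1 0 <
          PySem.List.pyGetD (PySem.List.pyGetD pairs p []) 1 0)) := by
    rw [← hmap, List.countP_map]
    rfl
  have hlen : ((PySem.List.pyRange (p + 1) (PySem.List.len pairs)).length : Int)
      = ((pairs.drop (p.toNat + 1)).length : Int) := by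
    simp [PySem.List.length_pyRange_one]
    omega
  rw [hcnt, hlen]
  have hcl := List.countP_le_length
    (p := fun l => decide (PySem.List.pyGetD l 1 0 <
      PySem.List.pyGetD (PySem.List.pyGetD pairs p []) 1 0))
    (l := pairs.drop (p.toNat + 1))
  rw [Bool.eq_iff_iff]
  simp only [beq_iff_eq, Option.some.injEq, decide_eq_false_iff_not, decide_eq_true_eq, not_lt]
  omega

theorem dataB_eq (pairs : List (List Int)) (p : Int) (h0 : 0 ≤ p) (h1 : p.toNat ≤ pairs.length) :
    (data_is_noise pairs p "behind" == some false)
      = decide (2 * ((pairs.take p.toNat).countP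
            (fun l => decide (PySem.List.pyGetD (PySem.List.pyGetD pairs p []) 1 0 <
              PySem.List.pyGetD l 1 0)))
          ≤ (pairs.take p.toNat).length) := by
  simp only [data_is_noise, beq_self_eq_true, if_true]
  rw [show (("behind" : String) == "ahead") = false by decide]
  simp only [Bool.false_eq_true, if_false]
  rw [counter_foldl]
  have hmap := map_pyGetD_pyRange_take pairs ([] : List Int) p h0 h1
  have hcnt : (PySem.List.pyRange 0 p).countP
      (fun x => decide (PySem.List.pyGetD (PySem.List.pyGetD pairs p []) 1 0 <
        PySem.List.pyGetD (PySem.List.pyGetD pairs x []) 1 0))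
      = (pairs.take p.toNat).countP
        (fun l => decide (PySem.List.pyGetD (PySem.List.pyGetD pairs p []) 1 0 <
          PySem.List.pyGetD l 1 0)) := by
    rw [← hmap, List.countP_map]
    rfl
  have hlen : ((PySem.List.pyRange 0 p).length : Int)
      = ((pairs.take p.toNat).length : Int) := by
    simp [PySem.List.length_pyRange_one]
    omega
  rw [hcnt, hlen]
  have hcl := List.countP_le_length
    (p := fun l => decide (PySem.List.pyGetD (PySem.List.pyGetD pairs p []) 1 0 <
      PySem.List.pyGetD l 1 0))
    (l := pairs.take p.toNat)
  rw [Bool.eq_iff_iff]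
  simp only [beq_iff_eq, Option.some.injEq, decide_eq_false_iff_not, decide_eq_true_eq, not_lt]
  omega

theorem build_pairs (u v : List Int) (h : u.length ≤ v.length) :
    (PySem.List.pyRange 0 (PySem.List.len u)).map
        (fun i => [PySem.List.pyGetD u i 0, PySem.List.pyGetD v i 0])
      = (u.zip v).map p2l := by
  apply List.ext_getElem
  · simp [PySem.List.length_pyRange_one]
    omega
  · intro i h1 h2
    have hiu : i < u.length := by
      simpa [PySem.List.length_pyRange_one] using h1
    have hiv : i < v.length := by omega
    rw [List.getElem_map, List.getElem_map, PySem.List.getElem_pyRange_one]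
    simp only [zero_add, PySem.List.pyGetD_natCast, p2l, List.getElem_zip]
    rw [List.getD_eq_getElem u 0 hiu, List.getD_eq_getElem v 0 hiv]

def aheadKeep (pts : List (Int × Int)) (k : Nat) : Bool :=
  decide (2 * ((pts.drop (k + 1)).countP (fun r => decide (r.2 < (pts.getD k (0, 0)).2)))
    ≤ (pts.drop (k + 1)).length)

theorem keepA (pts : List (Int × Int)) (h : pts ≠ []) :
    ((List.range (pts.length - 1)).filter (aheadKeep pts)).map (fun k => pts.getD k (0, 0))
      ++ [pts.getLast h] = keepCtx [] pts := by
  induction pts with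
  | nil => exact absurd rfl h
  | cons q rest ih =>
    cases rest with
    | nil => simp [keepCtx, aheadKeep]
    | cons q2 rest2 =>
      have hr : (q2 :: rest2 : List (Int × Int)) ≠ [] := by simp
      have hlen : (q :: q2 :: rest2 : List (Int × Int)).length - 1 = rest2.length + 1 := by simp
      rw [hlen, List.range_succ_eq_map, List.filter_cons]
      have hcp : List.countP (fun v => decide (v < q.2)) (q2.2 :: List.map Prod.snd rest2)
          = List.countP (fun r => decide (r.2 < q.2)) (q2 :: rest2) := by
        rw [← List.map_cons, List.countP_map]
        rfl
      have hhead : aheadKeep (q :: q2 :: rest2) 0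
          = decide (2 * (((q2 :: rest2).map Prod.snd ++ []).countP (fun v => decide (v < q.2)))
              ≤ ((q2 :: rest2).map Prod.snd ++ []).length) := by
        simp [aheadKeep, hcp]
      have hshift : ((List.range rest2.length).map Nat.succ).filter (aheadKeep (q :: q2 :: rest2))
          = ((List.range rest2.length).filter (aheadKeep (q2 :: rest2))).map Nat.succ := by
        rw [List.filter_map]
        congr 1
      have hmap2 : (((List.range rest2.length).filter (aheadKeep (q2 :: rest2))).map Nat.succ).map
            (fun k => (q :: q2 :: rest2).getD k (0, 0))
          = ((List.range rest2.length).filter (aheadKeep (q2 :: rest2))).map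
            (fun k => (q2 :: rest2).getD k (0, 0)) := by
        rw [List.map_map]
        apply List.map_congr_left
        intro k _
        simp [List.getD_cons_succ]
      have hlast : (q :: q2 :: rest2).getLast h = (q2 :: rest2).getLast hr :=
        List.getLast_cons hr
      rw [hhead, hshift]
      conv_rhs => rw [keepCtx]
      by_cases h0 : 2 * (((q2 :: rest2).map Prod.snd ++ []).countP (fun v => decide (v < q.2)))
          ≤ ((q2 :: rest2).map Prod.snd ++ []).length
      · rw [if_pos (decide_eq_true h0), if_pos h0, List.map_cons, hmap2, hlast, ← ih hr]
        simp
      · rw [if_neg (by simpa using h0), if_neg h0, hmap2, hlast, ← ih hr]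
        simp

def behindCond (ctx : List Int) (rest : List (Int × Int)) (k : Nat) : Bool :=
  decide (2 * ((ctx ++ (rest.take k).map Prod.snd).countP
      (fun v => decide ((rest.getD k (0, 0)).2 < v)))
    ≤ (ctx ++ (rest.take k).map Prod.snd).length)

theorem keepB (rest : List (Int × Int)) (ctx : List Int) (hc : ctx ≠ []) :
    ((List.range rest.length).filter (behindCond ctx rest)).map (fun k => rest.getD k (0, 0))
      = keepBehind ctx rest := by
  induction rest generalizing ctx with
  | nil => simp [keepBehind]
  | cons q rest2 ih =>
    have hlen : (q :: rest2 : List (Int × Int)).length = rest2.length + 1 := by simp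
    rw [hlen, List.range_succ_eq_map, List.filter_cons]
    have hpos : 0 < ctx.length := List.length_pos_of_ne_nil hc
    have hhead : behindCond ctx (q :: rest2) 0
        = decide (0 < ctx.length ∧ 2 * (ctx.countP (fun v => decide (q.2 < v))) ≤ ctx.length) := by
      simp [behindCond, hpos]
    have hshift : ((List.range rest2.length).map Nat.succ).filter (behindCond ctx (q :: rest2))
        = ((List.range rest2.length).filter (behindCond (ctx ++ [q.2]) rest2)).map Nat.succ := by
      rw [List.filter_map]
      congr 1
      apply List.filter_congr
      intro k _
      simp only [Function.comp, behindCond, List.getD_cons_succ, List.take_succ_cons,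
        List.map_cons]
      rw [List.append_cons]
    have hmap2 : (((List.range rest2.length).filter (behindCond (ctx ++ [q.2]) rest2)).map
          Nat.succ).map (fun k => (q :: rest2).getD k (0, 0))
        = ((List.range rest2.length).filter (behindCond (ctx ++ [q.2]) rest2)).map
          (fun k => rest2.getD k (0, 0)) := by
      rw [List.map_map]
      apply List.map_congr_left
      intro k _
      simp [List.getD_cons_succ]
    rw [hhead, hshift]
    conv_rhs => rw [keepBehind]
    have hc2 : (ctx ++ [q.2] : List Int) ≠ [] := by simp
    by_cases h0 : 0 < ctx.length ∧ 2 * (ctx.countP (fun v => decide (q.2 < v))) ≤ ctx.length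
    · rw [if_pos (decide_eq_true h0), if_pos h0, List.map_cons, hmap2, ← ih (ctx ++ [q.2]) hc2]
      simp
    · rw [if_neg (by simpa using h0), if_neg h0, hmap2, ← ih (ctx ++ [q.2]) hc2]
      simp

theorem pass1_fold (pts : List (Int × Int)) (kept0 : List (Int × Int)) (seen0 : List Int)
    (hs : List.Pairwise (· ≤ ·) seen0) :
    (pts.reverse.foldl (fun (st : List (Int × Int) × List Int) xy =>
        ((if 2 * PySem.List.bisectLeft st.2 xy.2 ≤ st.2.length then st.1 ++ [xy] else st.1),
         insortLeft st.2 xy.2)) (kept0, seen0)).1 = kept0 ++ (keepCtx seen0 pts).reverse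
    ∧ List.Pairwise (· ≤ ·) (pts.reverse.foldl (fun (st : List (Int × Int) × List Int) xy =>
        ((if 2 * PySem.List.bisectLeft st.2 xy.2 ≤ st.2.length then st.1 ++ [xy] else st.1),
         insortLeft st.2 xy.2)) (kept0, seen0)).2
    ∧ ((pts.reverse.foldl (fun (st : List (Int × Int) × List Int) xy =>
        ((if 2 * PySem.List.bisectLeft st.2 xy.2 ≤ st.2.length then st.1 ++ [xy] else st.1),
         insortLeft st.2 xy.2)) (kept0, seen0)).2).Perm (pts.map Prod.snd ++ seen0) := by
  induction pts with
  | nil =>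
    refine ⟨by simp [keepCtx], by simpa using hs, by simp⟩
  | cons q rest ih =>
    obtain ⟨ih1, ih2, ih3⟩ := ih
    rw [List.reverse_cons, List.foldl_append, List.foldl_cons, List.foldl_nil]
    set R := rest.reverse.foldl (fun (st : List (Int × Int) × List Int) xy =>
        ((if 2 * PySem.List.bisectLeft st.2 xy.2 ≤ st.2.length then st.1 ++ [xy] else st.1),
         insortLeft st.2 xy.2)) (kept0, seen0) with hR
    have hbl : 2 * PySem.List.bisectLeft R.2 q.2 ≤ R.2.length ↔
        2 * ((rest.map Prod.snd ++ seen0).countP (fun v => decide (v < q.2)))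
          ≤ (rest.map Prod.snd ++ seen0).length := by
      rw [bisectLeft_eq_countP R.2 q.2 ih2, ih3.countP_eq, ih3.length_eq]
    refine ⟨?_, insortLeft_pairwise _ _ ih2, ?_⟩
    · show (if 2 * PySem.List.bisectLeft R.2 q.2 ≤ R.2.length then R.1 ++ [q] else R.1)
        = kept0 ++ (keepCtx seen0 (q :: rest)).reverse
      conv_rhs => rw [keepCtx]
      by_cases hc : 2 * ((rest.map Prod.snd ++ seen0).countP (fun v => decide (v < q.2)))
          ≤ (rest.map Prod.snd ++ seen0).length
      · rw [if_pos (hbl.mpr hc), if_pos hc, ih1]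
        simp
      · rw [if_neg (fun hx => hc (hbl.mp hx)), if_neg hc, ih1]
        simp
    · show (insortLeft R.2 q.2).Perm ((q :: rest).map Prod.snd ++ seen0)
      exact (insortLeft_perm _ _).trans (ih3.cons q.2)

theorem pass2_fold (l : List (Int × Int)) (i : Int) (xs0 ys0 seen0 ctx : List Int)
    (hs : List.Pairwise (· ≤ ·) seen0) (hp : seen0.Perm ctx) (hi : i = (ctx.length : Int)) :
    ((PySem.List.enumerate l i).foldl (fun (st : List Int × List Int × List Int) ixy =>
        if 0 < ixy.1 ∧
           2 * (st.2.2.length - PySem.List.bisectRight st.2.2 ixy.2.2) ≤ st.2.2.length then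
          (st.1 ++ [ixy.2.1], st.2.1 ++ [ixy.2.2], insortLeft st.2.2 ixy.2.2)
        else (st.1, st.2.1, insortLeft st.2.2 ixy.2.2)) (xs0, ys0, seen0)).1
      = xs0 ++ (keepBehind ctx l).map Prod.fst
    ∧ ((PySem.List.enumerate l i).foldl (fun (st : List Int × List Int × List Int) ixy =>
        if 0 < ixy.1 ∧
           2 * (st.2.2.length - PySem.List.bisectRight st.2.2 ixy.2.2) ≤ st.2.2.length then
          (st.1 ++ [ixy.2.1], st.2.1 ++ [ixy.2.2], insortLeft st.2.2 ixy.2.2)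
        else (st.1, st.2.1, insortLeft st.2.2 ixy.2.2)) (xs0, ys0, seen0)).2.1
      = ys0 ++ (keepBehind ctx l).map Prod.snd := by
  induction l generalizing i xs0 ys0 seen0 ctx with
  | nil =>
    constructor <;> simp [PySem.List.enumerate, keepBehind]
  | cons q rest ih =>
    rw [PySem.List.enumerate_cons, List.foldl_cons]
    have hbr : 2 * (seen0.length - PySem.List.bisectRight seen0 q.2) ≤ seen0.length ↔
        2 * (ctx.countP (fun v => decide (q.2 < v))) ≤ ctx.length := by
      rw [bisectRight_eq_countP seen0 q.2 hs, hp.countP_eq, hp.length_eq]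
      have hsplit : ctx.countP (fun v => decide (v ≤ q.2))
          + ctx.countP (fun v => decide (q.2 < v)) = ctx.length := by
        have hcg : ctx.countP (fun v => decide (q.2 < v))
            = ctx.countP (fun a => decide ¬ ((fun v => decide (v ≤ q.2)) a = true)) := by
          apply List.countP_congr
          intro x _
          simp only [decide_eq_true_eq, decide_eq_decide]
          omega
        rw [hcg, ← List.length_eq_countP_add_countP]
      omega
    have hguard : (0 < i) ↔ (0 < ctx.length) := by
      subst hi
      exact Int.natCast_pos
    have hcond : (0 < i ∧ 2 * (seen0.length - PySem.List.bisectRight seen0 q.2) ≤ seen0.length)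
        ↔ (0 < ctx.length ∧ 2 * (ctx.countP (fun v => decide (q.2 < v))) ≤ ctx.length) :=
      and_congr hguard hbr
    have hs' : List.Pairwise (· ≤ ·) (insortLeft seen0 q.2) := insortLeft_pairwise _ _ hs
    have hp' : (insortLeft seen0 q.2).Perm (ctx ++ [q.2]) :=
      (insortLeft_perm _ _).trans ((hp.cons q.2).trans (List.perm_append_singleton q.2 ctx).symm)
    have hi' : i + 1 = ((ctx ++ [q.2]).length : Int) := by
      simp [hi]
    by_cases hc : 0 < ctx.length ∧ 2 * (ctx.countP (fun v => decide (q.2 < v))) ≤ ctx.length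
    · obtain ⟨j1, j2⟩ := ih (i + 1) (xs0 ++ [q.1]) (ys0 ++ [q.2]) (insortLeft seen0 q.2)
        (ctx ++ [q.2]) hs' hp' hi'
      rw [if_pos (hcond.mpr hc)]
      refine ⟨?_, ?_⟩
      · rw [j1]
        conv_rhs => rw [keepBehind]
        rw [if_pos hc]
        simp
      · rw [j2]
        conv_rhs => rw [keepBehind]
        rw [if_pos hc]
        simp
    · obtain ⟨j1, j2⟩ := ih (i + 1) xs0 ys0 (insortLeft seen0 q.2)
        (ctx ++ [q.2]) hs' hp' hi'
      rw [if_neg (fun hx => hc (hcond.mp hx))]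
      refine ⟨?_, ?_⟩
      · rw [j1]
        conv_rhs => rw [keepBehind]
        rw [if_neg hc]
        simp
      · rw [j2]
        conv_rhs => rw [keepBehind]
        rw [if_neg hc]
        simp

theorem p2l_get0 (r : Int × Int) : PySem.List.pyGetD (p2l r) 0 0 = r.1 :=
  PySem.List.pyGetD_zero_cons _ _ _

theorem p2l_get1 (r : Int × Int) : PySem.List.pyGetD (p2l r) 1 0 = r.2 := by
  simp [p2l, PySem.List.pyGetD_ofNat']

theorem pairsGet (pts : List (Int × Int)) (k : Nat) (hk : k < pts.length) :
    PySem.List.pyGetD (pts.map p2l) (k : Int) [] = p2l (pts.getD k (0, 0)) := by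
  rw [PySem.List.pyGetD_natCast,
    List.getD_eq_getElem (pts.map p2l) [] (by simpa using hk),
    List.getElem_map, List.getD_eq_getElem pts (0, 0) hk]

theorem A_eq (x y : List Int) (hne : x ≠ []) (hle : x.length ≤ y.length) :
    remove_noise x y = midSpec (x.zip y) := by
  have hzl : (x.zip y).length = x.length := by
    rw [List.length_zip]
    omega
  have hxpos : 0 < x.length := List.length_pos_of_ne_nil hne
  have hpne : x.zip y ≠ [] := by
    intro hz
    rw [hz] at hzl
    exact hne (List.length_eq_zero_iff.mp hzl.symm)
  simp only [remove_noise]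
  rw [build_pairs x y hle]
  set pts := x.zip y with hpts
  have hNpos : 0 < pts.length := by omega
  simp only [PySem.List.len_eq, List.length_map]
  -- pass 1 loop as two filtered maps
  rw [foldl_two_appends (PySem.List.pyRange 0 ((pts.length : Int) - 1))
    (fun p => data_is_noise (pts.map p2l) p "ahead" == some false)
    (fun p => PySem.List.pyGetD (PySem.List.pyGetD (pts.map p2l) p []) 0 0)
    (fun p => PySem.List.pyGetD (PySem.List.pyGetD (pts.map p2l) p []) 1 0) [] []]
  simp only [List.nil_append]
  -- the filter over Int indices is the Nat-index filter of keepA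
  have hfilter : (PySem.List.pyRange 0 ((pts.length : Int) - 1)).filter
        (fun p => data_is_noise (pts.map p2l) p "ahead" == some false)
      = ((List.range (pts.length - 1)).filter (aheadKeep pts)).map (fun k : Nat => (k : Int)) := by
    rw [PySem.List.pyRange_zero, show ((pts.length : Int) - 1).toNat = pts.length - 1 by omega,
      List.filter_map]
    refine congrArg (List.map fun (k : Nat) => (k : Int)) (List.filter_congr ?_)
    intro k hk
    have hk' : k < pts.length := by
      have := List.mem_range.mp hk
      omega
    simp only [Function.comp_apply]
    rw [dataA_eq (pts.map p2l) (k : Int) (Int.natCast_nonneg k)]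
    simp only [Int.toNat_natCast]
    rw [pairsGet pts k hk', p2l_get1]
    simp only [← List.map_drop, List.countP_map, List.length_map]
    have epred : List.countP ((fun l => decide (PySem.List.pyGetD l 1 0 < (pts.getD k (0, 0)).2))
          ∘ p2l) (pts.drop (k + 1))
        = List.countP (fun r => decide (r.2 < (pts.getD k (0, 0)).2)) (pts.drop (k + 1)) :=
      List.countP_congr (fun r _ => by simp [p2l_get1])
    simp only [epred]
    rfl
  rw [hfilter]
  -- the two getter maps are the two components of keepA's pair-level map
  have hmapf : (((List.range (pts.length - 1)).filter (aheadKeep pts)).map (fun k : Nat => (k : Int))).map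
        (fun p => PySem.List.pyGetD (PySem.List.pyGetD (pts.map p2l) p []) 0 0)
      = (((List.range (pts.length - 1)).filter (aheadKeep pts)).map
          (fun k => pts.getD k (0, 0))).map Prod.fst := by
    rw [List.map_map, List.map_map]
    apply List.map_congr_left
    intro k hk
    have hk' : k < pts.length := by
      have := List.mem_range.mp (List.mem_of_mem_filter hk)
      omega
    simp only [Function.comp_apply]
    rw [pairsGet pts k hk', p2l_get0]
  have hmapg : (((List.range (pts.length - 1)).filter (aheadKeep pts)).map (fun k : Nat => (k : Int))).map
        (fun p => PySem.List.pyGetD (PySem.List.pyGetD (pts.map p2l) p []) 1 0)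
      = (((List.range (pts.length - 1)).filter (aheadKeep pts)).map
          (fun k => pts.getD k (0, 0))).map Prod.snd := by
    rw [List.map_map, List.map_map]
    apply List.map_congr_left
    intro k hk
    have hk' : k < pts.length := by
      have := List.mem_range.mp (List.mem_of_mem_filter hk)
      omega
    simp only [Function.comp_apply]
    rw [pairsGet pts k hk', p2l_get1]
  rw [hmapf, hmapg]
  -- the last point
  have hlastp : PySem.List.pyGetD (pts.map p2l) ((pts.length : Int) - 1) [] = p2l (pts.getLast hpne) := by
    rw [PySem.List.pyGetD_eq_getElem (pts.map p2l) [] (by omega)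
        (by simp only [List.length_map]; omega),
      List.getElem_map, List.getLast_eq_getElem]
    congr 2
    omega
  rw [hlastp, p2l_get0, p2l_get1]
  -- assemble pass-1 output via keepA
  have hX : (((List.range (pts.length - 1)).filter (aheadKeep pts)).map
        (fun k => pts.getD k (0, 0))).map Prod.fst ++ [(pts.getLast hpne).1]
      = (keepCtx [] pts).map Prod.fst := by
    have := congrArg (List.map Prod.fst) (keepA pts hpne)
    simpa using this
  have hY : (((List.range (pts.length - 1)).filter (aheadKeep pts)).map
        (fun k => pts.getD k (0, 0))).map Prod.snd ++ [(pts.getLast hpne).2]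
      = (keepCtx [] pts).map Prod.snd := by
    have := congrArg (List.map Prod.snd) (keepA pts hpne)
    simpa using this
  rw [hX, hY]
  have hk1 : keepCtx [] pts ≠ [] := by
    rw [← keepA pts hpne]
    simp
  obtain ⟨q0, rest, hk⟩ := List.exists_cons_of_ne_nil hk1
  rw [hk]
  simp only [midSpec, hk]
  by_cases hone : (q0 :: rest : List (Int × Int)).length = 1
  · have hrest : rest = [] := by
      simpa using hone
    subst hrest
    simp
  · have hrne : rest ≠ [] := fun hr => hone (by simp [hr])
    have hcond : ((((q0 :: rest : List (Int × Int)).map Prod.fst).length == 1)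
        && (((q0 :: rest : List (Int × Int)).map Prod.snd).length == 1)) = false := by
      simp [hrne]
    rw [hcond]
    simp only [Bool.false_eq_true, if_false, if_neg hone]
    -- pass 2
    have hb2 := build_pairs ((q0 :: rest : List (Int × Int)).map Prod.fst)
      ((q0 :: rest : List (Int × Int)).map Prod.snd) (by simp)
    simp only [PySem.List.len_eq, List.length_map, List.length_cons] at hb2
    simp only [List.length_map, List.length_cons]
    rw [hb2]
    rw [Eq.symm (List.zip_of_prod (rfl : (q0 :: rest : List (Int × Int)).map Prod.fst
        = (q0 :: rest : List (Int × Int)).map Prod.fst)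
      (rfl : (q0 :: rest : List (Int × Int)).map Prod.snd
        = (q0 :: rest : List (Int × Int)).map Prod.snd))]
    simp only [PySem.List.length_pyRange_one, sub_zero, Int.toNat_natCast, List.length_map,
      List.length_cons, sub_add_cancel]
    rw [foldl_two_appends (PySem.List.pyRange 1 ((rest.length + 1 : Nat) : Int))
      (fun p => data_is_noise ((q0 :: rest : List (Int × Int)).map p2l) p "behind" == some false)
      (fun p => PySem.List.pyGetD (PySem.List.pyGetD ((q0 :: rest : List (Int × Int)).map p2l) p []) 0 0)
      (fun p => PySem.List.pyGetD (PySem.List.pyGetD ((q0 :: rest : List (Int × Int)).map p2l) p []) 1 0) [] []]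
    simp only [List.nil_append]
    have hfilter2 : (PySem.List.pyRange 1 ((rest.length + 1 : Nat) : Int)).filter
          (fun p => data_is_noise ((q0 :: rest : List (Int × Int)).map p2l) p "behind" == some false)
        = ((List.range rest.length).filter (behindCond [q0.2] rest)).map (fun k : Nat => (1 : Int) + (k : Int)) := by
      rw [PySem.List.pyRange_one, show (((rest.length + 1 : Nat) : Int) - 1).toNat
        = rest.length by omega, List.filter_map]
      refine congrArg (List.map fun (k : Nat) => (1 : Int) + (k : Int)) (List.filter_congr ?_)
      intro k hk2
      have hk2' : k < rest.length := List.mem_range.mp hk2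
      simp only [Function.comp_apply]
      rw [show ((1 : Int) + k) = ((k + 1 : Nat) : Int) by push_cast; ring]
      rw [dataB_eq ((q0 :: rest : List (Int × Int)).map p2l) ((k + 1 : Nat) : Int)
        (Int.natCast_nonneg _)
        (by simp only [Int.toNat_natCast, List.length_map, List.length_cons]; omega)]
      simp only [Int.toNat_natCast]
      rw [pairsGet (q0 :: rest) (k + 1) (by simp only [List.length_cons]; omega),
        List.getD_cons_succ, p2l_get1]
      simp only [← List.map_take, List.take_succ_cons, List.countP_map, List.length_map]
      have e1 : List.countP ((fun l => decide ((rest.getD k (0, 0)).2 < PySem.List.pyGetD l 1 0))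
            ∘ p2l) (q0 :: rest.take k)
          = List.countP (fun r => decide ((rest.getD k (0, 0)).2 < r.2)) (q0 :: rest.take k) :=
        List.countP_congr (fun r _ => by simp [p2l_get1])
      have e2 : List.countP (fun v => decide ((rest.getD k (0, 0)).2 < v))
            ([q0.2] ++ (rest.take k).map Prod.snd)
          = List.countP (fun r => decide ((rest.getD k (0, 0)).2 < r.2)) (q0 :: rest.take k) := by
        rw [List.singleton_append, ← List.map_cons, List.countP_map]
        rfl
      unfold behindCond
      simp only [e1, e2, List.length_cons, List.length_append, List.length_map, List.length_nil]
      rw [decide_eq_decide]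
      omega
    rw [hfilter2]
    have hmapf2 : (((List.range rest.length).filter (behindCond [q0.2] rest)).map
          (fun k : Nat => (1 : Int) + (k : Int))).map
          (fun p => PySem.List.pyGetD (PySem.List.pyGetD
            ((q0 :: rest : List (Int × Int)).map p2l) p []) 0 0)
        = (((List.range rest.length).filter (behindCond [q0.2] rest)).map
            (fun k => rest.getD k (0, 0))).map Prod.fst := by
      rw [List.map_map, List.map_map]
      apply List.map_congr_left
      intro k hk2
      have hk2' : k < rest.length := List.mem_range.mp (List.mem_of_mem_filter hk2)
      simp only [Function.comp_apply]
      rw [show ((1 : Int) + k) = ((k + 1 : Nat) : Int) by push_cast; ring]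
      rw [pairsGet (q0 :: rest) (k + 1) (by simp only [List.length_cons]; omega),
        List.getD_cons_succ, p2l_get0]
    have hmapg2 : (((List.range rest.length).filter (behindCond [q0.2] rest)).map
          (fun k : Nat => (1 : Int) + (k : Int))).map
          (fun p => PySem.List.pyGetD (PySem.List.pyGetD
            ((q0 :: rest : List (Int × Int)).map p2l) p []) 1 0)
        = (((List.range rest.length).filter (behindCond [q0.2] rest)).map
            (fun k => rest.getD k (0, 0))).map Prod.snd := by
      rw [List.map_map, List.map_map]
      apply List.map_congr_left
      intro k hk2
      have hk2' : k < rest.length := List.mem_range.mp (List.mem_of_mem_filter hk2)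
      simp only [Function.comp_apply]
      rw [show ((1 : Int) + k) = ((k + 1 : Nat) : Int) by push_cast; ring]
      rw [pairsGet (q0 :: rest) (k + 1) (by simp only [List.length_cons]; omega),
        List.getD_cons_succ, p2l_get1]
    rw [hmapf2, hmapg2, keepB rest [q0.2] (by simp)]
    have hhead0 : PySem.List.pyGetD (PySem.List.pyGetD
        ((q0 :: rest : List (Int × Int)).map p2l) 0 []) 0 0 = q0.1 := by
      rw [List.map_cons, PySem.List.pyGetD_zero_cons, p2l_get0]
    have hhead1 : PySem.List.pyGetD (PySem.List.pyGetD
        ((q0 :: rest : List (Int × Int)).map p2l) 0 []) 1 0 = q0.2 := by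
      rw [List.map_cons, PySem.List.pyGetD_zero_cons, p2l_get1]
    rw [hhead0, hhead1]

theorem B_eq (x y : List Int) (hne : x ≠ []) (hle : x.length ≤ y.length) :
    remove_noise_alt x y = midSpec (x.zip y) := by
  have hpne : x.zip y ≠ [] := by
    have : (x.zip y).length = x.length := by
      rw [List.length_zip]
      omega
    intro hz
    rw [hz] at this
    simp at this
    exact hne (List.length_eq_zero_iff.mp this.symm)
  simp only [remove_noise_alt]
  obtain ⟨f1, -, -⟩ := pass1_fold (x.zip y) [] [] (by simp)
  rw [f1, List.nil_append, List.reverse_reverse]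
  have hk1 : keepCtx [] (x.zip y) ≠ [] := by
    rw [← keepA (x.zip y) hpne]
    simp
  obtain ⟨q0, rest, hk⟩ := List.exists_cons_of_ne_nil hk1
  rw [hk]
  simp only [midSpec, hk]
  by_cases hone : (q0 :: rest : List (Int × Int)).length = 1
  · have hrest : rest = [] := by
      simpa using hone
    subst hrest
    simp [PySem.List.pyGetD_zero_cons]
  · have hrne : rest ≠ [] := fun hr => hone (by simp [hr])
    have hlb : ((q0 :: rest : List (Int × Int)).length == 1) = false := by
      simp [hrne]
    rw [hlb]
    simp only [Bool.false_eq_true, if_false, if_neg hone]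
    obtain ⟨j1, j2⟩ := pass2_fold (q0 :: rest) 0 [] [] [] [] (by simp) (List.Perm.refl [])
      (by simp)
    rw [j1, j2, List.nil_append, List.nil_append]
    have hkb : keepBehind [] (q0 :: rest) = keepBehind [q0.2] rest := by
      rw [keepBehind]
      simp
    rw [hkb]
    simp [PySem.List.pyGetD_zero_cons]


-- ===== VERDICT (by name: the statement is the Claim_ definition above) =====
theorem remove_noise_spec : Claim_equal_remove_noise := by
  intro x y _ hpre
  unfold Spec_remove_noise
  rw [A_eq x y hpre.1 hpre.2, B_eq x y hpre.1 hpre.2]
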